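-- pv_equiv track=rewrite | github.com/SuersserMann/finance_ner | 垂死挣扎_p.py | generate_lists
-- ===== SOURCE A (Python) =====
-- def generate_lists(lst):
--     list1 = []
--     list2 = []
--
--     current_num = lst[0]
--     start_index = 0
--     a = 0
--     for i in range(1, len(lst)):
--         if lst[i] != current_num:
--             list1.append(current_num)
--             list2.append([start_index - 1, i - 2])
--             current_num = lst[i]
--             start_index = i
--
--     # 处理最后一个数字
--     list1.append(current_num)
--     list2.append([start_index - 1, len(lst) - 2])
--     list1, list2 = remove_greater_than_102(list1, list2)
--     return list1, list2
--
-- def remove_greater_than_102(list1, list2):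
--     new_list1 = []
--     new_list2 = []
--
--     for i in range(len(list1)):
--         if list1[i] <= 102:
--             new_list1.append(list1[i])
--             new_list2.append(list2[i])
--
--     return new_list1, new_list2
-- ===== SOURCE B (Python) =====
-- def generate_lists(lst):
--     n = len(lst)
--     starts = [i for i in range(n) if i == 0 or lst[i] != lst[i - 1]]
--     ends = starts[1:] + [n]
--     list1, list2 = [], []
--     for s, e in zip(starts, ends):
--         v = lst[s]
--         if v <= 102:
--             list1.append(v)
--             list2.append([s - 1, e - 2])
--     return list1, list2
-- ===== Notes on version B (the rewrite author's own statement) =====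
-- stated objective: simpler
-- what changed: B replaces A's single inline run-tracking loop (current value, start index, post-loop flush, then a separate index-based filter pass) by a two-phase decomposition: it first builds the boundary-index table of run starts, then emits value/range pairs from consecutive boundaries with the <=102 filter fused in.
import Mathlib
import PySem

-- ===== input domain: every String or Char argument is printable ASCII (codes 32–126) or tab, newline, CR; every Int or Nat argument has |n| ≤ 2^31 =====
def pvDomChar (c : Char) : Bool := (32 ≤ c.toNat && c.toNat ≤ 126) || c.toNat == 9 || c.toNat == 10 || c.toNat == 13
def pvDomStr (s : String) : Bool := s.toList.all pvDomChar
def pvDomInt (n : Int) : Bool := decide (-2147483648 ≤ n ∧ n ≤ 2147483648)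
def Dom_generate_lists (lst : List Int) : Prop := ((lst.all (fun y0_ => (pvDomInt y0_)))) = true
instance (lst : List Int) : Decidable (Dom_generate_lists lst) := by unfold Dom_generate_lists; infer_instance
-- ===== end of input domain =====

-- B replaces A's inline run-tracking loop by a two-phase decomposition (boundary-index table, then range emission with the ≤102 filter fused in); objective: simpler. A raises IndexError on [], B returns ([], []).


-- ===== PORT A =====
def remove_greater_than_102 (list1 : List Int) (list2 : List (List Int)) : List Int × List (List Int) :=
  (PySem.List.pyRange 0 (PySem.List.len list1) 1).foldl
    (fun (acc : List Int × List (List Int)) i =>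
      if PySem.List.pyGetD list1 i 0 ≤ 102 then
        (acc.1 ++ [PySem.List.pyGetD list1 i 0], acc.2 ++ [PySem.List.pyGetD list2 i []])
      else acc)
    ([], [])

def generate_lists (lst : List Int) : List Int × List (List Int) :=
  -- current_num = lst[0] raises IndexError on []; Pre_ excludes the empty list
  let st := (PySem.List.pyRange 1 (PySem.List.len lst) 1).foldl
    (fun (st : (List Int × List (List Int)) × Int × Int) i =>
      if (PySem.List.pyGetD lst i 0 != st.2.1) then
        ((st.1.1 ++ [st.2.1], st.1.2 ++ [[st.2.2 - 1, i - 2]]), PySem.List.pyGetD lst i 0, i)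
      else st)
    ((([] : List Int), ([] : List (List Int))), PySem.List.pyGetD lst 0 0, (0 : Int))
  remove_greater_than_102 (st.1.1 ++ [st.2.1]) (st.1.2 ++ [[st.2.2 - 1, PySem.List.len lst - 2]])

-- ===== PORT B =====
def generate_lists_alt (lst : List Int) : List Int × List (List Int) :=
  let n := PySem.List.len lst
  let starts := (PySem.List.pyRange 0 n 1).filter
    (fun i => i == 0 || (PySem.List.pyGetD lst i 0 != PySem.List.pyGetD lst (i - 1) 0))
  let ends := starts.drop 1 ++ [n]
  (starts.zip ends).foldl
    (fun (acc : List Int × List (List Int)) p =>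
      if PySem.List.pyGetD lst p.1 0 ≤ 102 then
        (acc.1 ++ [PySem.List.pyGetD lst p.1 0], acc.2 ++ [[p.1 - 1, p.2 - 2]])
      else acc)
    ([], [])

-- ===== PRECONDITION & SPEC =====
-- Pre_ excludes only the empty list, on which A raises IndexError (lst[0]).
def Pre_generate_lists (lst : List Int) : Prop := lst ≠ []
instance (lst : List Int) : Decidable (Pre_generate_lists lst) := by unfold Pre_generate_lists; infer_instance
def pvWitness_generate_lists : List Int := [100, 100, 103, 5]

def Spec_generate_lists (lst : List Int) (out : List Int × List (List Int)) : Prop := out = generate_lists_alt lst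
instance (lst : List Int) (out : List Int × List (List Int)) : Decidable (Spec_generate_lists lst out) := by unfold Spec_generate_lists; infer_instance

-- ===== CLAIM (what is proved, stated in full; the proofs are below) =====
def Claim_equal_generate_lists : Prop := ∀ (lst : List Int), Dom_generate_lists lst → Pre_generate_lists lst → Spec_generate_lists lst (generate_lists lst)

-- ===== LEMMAS AND PROOFS =====

-- the boundary-index list of B, on the prefix of indices < m
def gl_starts (lst : List Int) (m : Int) : List Int :=
  (PySem.List.pyRange 0 m 1).filter
    (fun i => i == 0 || (PySem.List.pyGetD lst i 0 != PySem.List.pyGetD lst (i - 1) 0))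

-- the [start-1, end-2] ranges generated from consecutive boundaries
def gl_pairs (S : List Int) : List (List Int) :=
  (S.zip (S.drop 1)).map (fun p => [p.1 - 1, p.2 - 2])

lemma gl_starts_one (lst : List Int) : gl_starts lst 1 = [0] := by
  have h0 : PySem.List.pyRange 0 1 1 = [0] := by decide
  unfold gl_starts
  rw [h0]
  simp

lemma gl_starts_succ (lst : List Int) (m : Nat) :
    gl_starts lst ((m : Int) + 1) = gl_starts lst m ++
      (if ((m : Int) == 0 || (PySem.List.pyGetD lst m 0 != PySem.List.pyGetD lst ((m : Int) - 1) 0))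
       then [(m : Int)] else []) := by
  unfold gl_starts
  rw [PySem.List.pyRange_one_succ_right (by positivity), List.filter_append]
  simp only [List.filter_cons, List.filter_nil]

lemma gl_starts_ne_nil (lst : List Int) (m : Nat) (h : 1 ≤ m) : gl_starts lst m ≠ [] := by
  have h0 : (0 : Int) ∈ gl_starts lst m := by
    unfold gl_starts
    refine List.mem_filter.2 ⟨?_, by simp⟩
    rw [PySem.List.mem_pyRange_one]
    omega
  exact List.ne_nil_of_mem h0

lemma dropLast_append_getLastD {α : Type} (l : List α) (d : α) (h : l ≠ []) :
    l.dropLast ++ [l.getLastD d] = l := by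
  induction l with
  | nil => simp at h
  | cons a t ih =>
    cases t with
    | nil => simp
    | cons b t' => simpa using ih (by simp)

lemma gl_zipfin (S : List Int) (x : Int) (h : S ≠ []) :
    S.zip (S.drop 1 ++ [x]) = S.zip (S.drop 1) ++ [(S.getLastD 0, x)] := by
  induction S with
  | nil => simp at h
  | cons a t ih =>
    cases t with
    | nil => simp
    | cons b t' => simpa using ih (by simp)

lemma gl_zipext (S : List Int) (x : Int) (h : S ≠ []) :
    (S ++ [x]).zip ((S ++ [x]).drop 1) = S.zip (S.drop 1) ++ [(S.getLastD 0, x)] := by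
  induction S with
  | nil => simp at h
  | cons a t ih =>
    cases t with
    | nil => simp
    | cons b t' => simpa using ih (by simp)

lemma gl_pairs_concat (S : List Int) (x : Int) (h : S ≠ []) :
    gl_pairs (S ++ [x]) = gl_pairs S ++ [[S.getLastD 0 - 1, x - 2]] := by
  unfold gl_pairs
  rw [gl_zipext S x h, List.map_append]
  rfl

lemma gl_inv (lst : List Int) (m : Nat) (h1 : 1 ≤ m) (h2 : m ≤ lst.length) :
    ((PySem.List.pyRange 1 (m : Int) 1).foldl
        (fun (st : (List Int × List (List Int)) × Int × Int) i =>
          if (PySem.List.pyGetD lst i 0 != st.2.1) then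
            ((st.1.1 ++ [st.2.1], st.1.2 ++ [[st.2.2 - 1, i - 2]]), PySem.List.pyGetD lst i 0, i)
          else st)
        ((([] : List Int), ([] : List (List Int))), PySem.List.pyGetD lst 0 0, (0 : Int)))
      = (((gl_starts lst m).dropLast.map (fun j => PySem.List.pyGetD lst j 0),
          gl_pairs (gl_starts lst m)),
         PySem.List.pyGetD lst ((m : Int) - 1) 0, (gl_starts lst m).getLastD 0)
    ∧ PySem.List.pyGetD lst ((gl_starts lst m).getLastD 0) 0 = PySem.List.pyGetD lst ((m : Int) - 1) 0 := by
  induction m, h1 using Nat.le_induction with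
  | base =>
    rw [show ((1 : Nat) : Int) = 1 from rfl, PySem.List.pyRange_one_eq_nil le_rfl]
    simp [gl_starts_one, gl_pairs]
  | succ m hm ih =>
    obtain ⟨hst, hcur⟩ := ih (by omega)
    have e : ((m + 1 : Nat) : Int) - 1 = (m : Int) := by push_cast; ring
    have hrange : PySem.List.pyRange 1 ((m + 1 : Nat) : Int) 1
        = PySem.List.pyRange 1 (m : Int) 1 ++ [(m : Int)] := by
      push_cast
      exact PySem.List.pyRange_one_succ_right (by exact_mod_cast hm)
    have hsucc := gl_starts_succ lst m
    have hm0 : ((m : Int) == 0) = false := by simp; omega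
    rw [hm0, Bool.false_or] at hsucc
    have hcast : ((m : Int) + 1) = ((m + 1 : Nat) : Int) := by push_cast; ring
    rw [hcast] at hsucc
    have hSne := gl_starts_ne_nil lst m hm
    rw [hrange, List.foldl_append, hst]
    simp only [List.foldl_cons, List.foldl_nil]
    by_cases hb : PySem.List.pyGetD lst (m : Int) 0 = PySem.List.pyGetD lst ((m : Int) - 1) 0
    · have hbne : (PySem.List.pyGetD lst (m : Int) 0 != PySem.List.pyGetD lst ((m : Int) - 1) 0) = false := by
        simp only [bne_eq_false_iff_eq]; simpa using hb
      rw [hbne] at hsucc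
      simp only [Bool.false_eq_true, if_false] at hsucc
      rw [List.append_nil] at hsucc
      rw [hsucc, e, hbne]
      simp only [Bool.false_eq_true, if_false]
      exact ⟨by rw [hb], by rw [hcur, hb]⟩
    · have hbne : (PySem.List.pyGetD lst (m : Int) 0 != PySem.List.pyGetD lst ((m : Int) - 1) 0) = true := by
        simp only [bne_iff_ne, ne_eq]; simpa using hb
      rw [hbne] at hsucc
      simp only [if_true] at hsucc
      rw [hsucc, e, hbne]
      simp only [if_true]
      constructor
      · have h1 : ((gl_starts lst (m : Int)) ++ [(m : Int)]).dropLast.map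
            (fun j => PySem.List.pyGetD lst j 0)
            = (gl_starts lst (m : Int)).dropLast.map (fun j => PySem.List.pyGetD lst j 0)
              ++ [PySem.List.pyGetD lst ((m : Int) - 1) 0] := by
          rw [List.dropLast_concat, ← hcur,
            ← dropLast_append_getLastD (gl_starts lst (m : Int)) 0 hSne]
          simp
        rw [h1, gl_pairs_concat _ _ hSne, List.getLastD_concat]
      · rw [List.getLastD_concat]

lemma remove102_zip (lst : List Int) (Z : List (Int × Int)) :
    remove_greater_than_102 (Z.map (fun p => PySem.List.pyGetD lst p.1 0))
        (Z.map (fun p => [p.1 - 1, p.2 - 2]))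
      = Z.foldl
          (fun (acc : List Int × List (List Int)) p =>
            if PySem.List.pyGetD lst p.1 0 ≤ 102 then
              (acc.1 ++ [PySem.List.pyGetD lst p.1 0], acc.2 ++ [[p.1 - 1, p.2 - 2]])
            else acc)
          ([], []) := by
  unfold remove_greater_than_102
  have hlen : PySem.List.len (Z.map (fun p => PySem.List.pyGetD lst p.1 0)) = (Z.length : Int) := by
    simp
  rw [hlen]
  have hcongr : ∀ (acc : List Int × List (List Int)) (i : Int),
      i ∈ PySem.List.pyRange 0 (Z.length : Int) 1 →
      (if PySem.List.pyGetD (Z.map (fun p => PySem.List.pyGetD lst p.1 0)) i 0 ≤ 102 then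
        (acc.1 ++ [PySem.List.pyGetD (Z.map (fun p => PySem.List.pyGetD lst p.1 0)) i 0],
         acc.2 ++ [PySem.List.pyGetD (Z.map (fun p => [p.1 - 1, p.2 - 2])) i []])
       else acc)
      = (fun (acc : List Int × List (List Int)) (z : Int × Int) =>
          if PySem.List.pyGetD lst z.1 0 ≤ 102 then
            (acc.1 ++ [PySem.List.pyGetD lst z.1 0], acc.2 ++ [[z.1 - 1, z.2 - 2]])
          else acc) acc (PySem.List.pyGetD Z i (0, 0)) := by
    intro acc i hi
    rw [PySem.List.mem_pyRange_one] at hi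
    have hi2 : i < ((Z.map (fun p => PySem.List.pyGetD lst p.1 0)).length : Int) := by
      simp; omega
    have hi3 : i < ((Z.map (fun p => [p.1 - 1, p.2 - 2])).length : Int) := by
      simp; omega
    have hi4 : i < (Z.length : Int) := by omega
    rw [PySem.List.pyGetD_eq_getElem _ 0 hi.1 hi2, PySem.List.pyGetD_eq_getElem _ [] hi.1 hi3,
      PySem.List.pyGetD_eq_getElem _ (0, 0) hi.1 hi4]
    simp
  rw [PySem.List.foldl_congr_mem _ _ _ _ hcongr]
  exact PySem.List.foldl_pyRange_zero_pyGetD' Z (0, 0)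
    (fun (acc : List Int × List (List Int)) (z : Int × Int) =>
      if PySem.List.pyGetD lst z.1 0 ≤ 102 then
        (acc.1 ++ [PySem.List.pyGetD lst z.1 0], acc.2 ++ [[z.1 - 1, z.2 - 2]])
      else acc) ([], [])

-- ===== VERDICT (by name: the statement is the Claim_ definition above) =====
theorem generate_lists_spec : Claim_equal_generate_lists := by
  unfold Claim_equal_generate_lists
  intro lst _ hpre
  unfold Spec_generate_lists
  have hn : 1 ≤ lst.length := List.length_pos_of_ne_nil hpre
  obtain ⟨hst, hcur⟩ := gl_inv lst lst.length hn le_rfl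
  have hSne := gl_starts_ne_nil lst lst.length hn
  simp only [generate_lists, generate_lists_alt, PySem.List.len_eq]
  rw [hst]
  have hBs : (PySem.List.pyRange 0 ((lst.length : Int)) 1).filter
      (fun i => i == 0 || (PySem.List.pyGetD lst i 0 != PySem.List.pyGetD lst (i - 1) 0))
      = gl_starts lst (lst.length : Int) := rfl
  rw [hBs]
  have hdlen : 1 ≤ (gl_starts lst (lst.length : Int)).length := by
    have := List.length_pos_of_ne_nil hSne
    omega
  have hlen : (gl_starts lst (lst.length : Int)).length
      ≤ ((gl_starts lst (lst.length : Int)).drop 1 ++ [(lst.length : Int)]).length := by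
    simp
    omega
  have e1 : (gl_starts lst (lst.length : Int)).dropLast.map (fun j => PySem.List.pyGetD lst j 0)
      ++ [PySem.List.pyGetD lst ((lst.length : Int) - 1) 0]
      = ((gl_starts lst (lst.length : Int)).zip
          ((gl_starts lst (lst.length : Int)).drop 1 ++ [(lst.length : Int)])).map
          (fun p => PySem.List.pyGetD lst p.1 0) := by
    rw [show ((fun (p : Int × Int) => PySem.List.pyGetD lst p.1 0))
        = ((fun j => PySem.List.pyGetD lst j 0) ∘ Prod.fst) from rfl]
    rw [← List.map_map, List.map_fst_zip hlen, ← hcur,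
      ← dropLast_append_getLastD (gl_starts lst (lst.length : Int)) 0 hSne]
    simp
  have e2 : gl_pairs (gl_starts lst (lst.length : Int))
      ++ [[(gl_starts lst (lst.length : Int)).getLastD 0 - 1, (lst.length : Int) - 2]]
      = ((gl_starts lst (lst.length : Int)).zip
          ((gl_starts lst (lst.length : Int)).drop 1 ++ [(lst.length : Int)])).map
          (fun p => [p.1 - 1, p.2 - 2]) := by
    rw [gl_zipfin _ _ hSne, List.map_append]
    rfl
  rw [e1, e2, remove102_zip]
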